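-- pv_equiv track=rewrite | github.com/Gaju27/Assignment_17_B | sum_of_possible_triplet_products.py | findTripleSum
-- ===== SOURCE A (Python) =====
-- M = 1000000007
--
-- def findTripleSum(A, B, C):
--     # Stores sum required sum
--     sum = 0
--
--     # Iterate over all
--     # possible values of i
--     for i in range(1, A + 1):
--
--         # Iterate over all
--         # possible values of j
--         for j in range(1, B + 1):
--
--             # Iterate over all
--             # possible values of k
--             for k in range(1, C + 1):
--                 # Stores the product
--                 # of (i * j *k)
--                 prod = (((i % M) * (j % M)) %
--                         M * (k % M)) % M
--
--                 # Update sum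
--                 sum = (sum + prod) % M
--
--     return sum
-- ===== SOURCE B (Python) =====
-- M = 1000000007
--
-- def findTripleSum(A, B, C):
--     # closed form: sum_{i<=A,j<=B,k<=C} i*j*k = T(A)*T(B)*T(C), taken mod M
--     def tri(n):
--         m = max(n, 0)
--         return m * (m + 1) // 2
--     return (tri(A) % M) * (tri(B) % M) % M * (tri(C) % M) % M
-- ===== Notes on version B (the rewrite author's own statement) =====
-- stated objective: faster
-- what changed: Replaced the O(A*B*C) triple loop by the closed form T(A)*T(B)*T(C) mod M, where T(n)=n(n+1)/2 (0 for n<=0), since the sum of i*j*k factors into a product of triangular numbers.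
import Mathlib
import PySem

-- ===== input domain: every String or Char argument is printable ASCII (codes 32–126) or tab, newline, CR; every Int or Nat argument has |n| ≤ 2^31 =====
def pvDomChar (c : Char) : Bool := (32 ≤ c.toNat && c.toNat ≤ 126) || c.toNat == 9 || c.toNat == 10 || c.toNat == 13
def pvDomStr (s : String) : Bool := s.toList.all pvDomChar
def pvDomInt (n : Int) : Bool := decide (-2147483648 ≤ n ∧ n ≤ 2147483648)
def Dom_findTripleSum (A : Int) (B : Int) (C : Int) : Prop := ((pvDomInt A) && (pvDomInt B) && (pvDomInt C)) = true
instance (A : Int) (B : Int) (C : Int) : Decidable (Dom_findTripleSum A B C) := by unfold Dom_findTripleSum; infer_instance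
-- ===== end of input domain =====

-- B replaces A's O(A*B*C) triple loop by the closed form T(A)*T(B)*T(C) mod M (asymptotically faster).

-- the module constant M = 1000000007
def pvM : Int := 1000000007

-- ===== PORT A =====
def findTripleSum (A : Int) (B : Int) (C : Int) : Int :=
  (PySem.List.pyRange 1 (A + 1) 1).foldl (fun sum i =>
    (PySem.List.pyRange 1 (B + 1) 1).foldl (fun sum j =>
      (PySem.List.pyRange 1 (C + 1) 1).foldl (fun sum k =>
        PySem.Int.mod
          (sum + PySem.Int.mod (PySem.Int.mod (PySem.Int.mod i pvM * PySem.Int.mod j pvM) pvM * PySem.Int.mod k pvM) pvM)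
          pvM) sum) sum) 0

-- ===== PORT B =====
-- tri(n) = max(n,0)*(max(n,0)+1) // 2
def pvTri (n : Int) : Int :=
  PySem.Int.floordiv (max n 0 * (max n 0 + 1)) 2

def findTripleSum_alt (A : Int) (B : Int) (C : Int) : Int :=
  PySem.Int.mod
    (PySem.Int.mod (PySem.Int.mod (pvTri A) pvM * PySem.Int.mod (pvTri B) pvM) pvM * PySem.Int.mod (pvTri C) pvM)
    pvM

-- ===== PRECONDITION & SPEC =====
def Spec_findTripleSum (A : Int) (B : Int) (C : Int) (out : Int) : Prop := out = findTripleSum_alt A B C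
instance (A : Int) (B : Int) (C : Int) (out : Int) : Decidable (Spec_findTripleSum A B C out) := by unfold Spec_findTripleSum; infer_instance

-- ===== CLAIM (what is proved, stated in full; the proofs are below) =====
def Claim_equal_findTripleSum : Prop := ∀ (A : Int) (B : Int) (C : Int), Dom_findTripleSum A B C → Spec_findTripleSum A B C (findTripleSum A B C)

-- ===== LEMMAS AND PROOFS =====

theorem pv_modM (x : Int) : PySem.Int.mod x pvM = x % pvM :=
  PySem.Int.mod_eq_emod_of_pos (by norm_num [pvM])

-- a fold that adds-and-reduces mod pvM computes (start + total) % pvM, provided start is reduced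
theorem pv_foldG (l : List Int) (step : Int → Int → Int) (g : Int → Int)
    (hstep : ∀ acc k, acc % pvM = acc → step acc k = (acc + g k) % pvM) :
    ∀ s : Int, s % pvM = s → l.foldl step s = (s + (l.map g).sum) % pvM := by
  induction l with
  | nil => intro s hs; simpa using hs.symm
  | cons a l ih =>
    intro s hs
    have h1 : (s + g a) % pvM % pvM = (s + g a) % pvM := Int.emod_emod_of_dvd _ dvd_rfl
    calc (a :: l).foldl step s = l.foldl step (step s a) := rfl
      _ = l.foldl step ((s + g a) % pvM) := by rw [hstep s a hs]
      _ = ((s + g a) % pvM + (l.map g).sum) % pvM := ih _ h1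
      _ = (s + ((a :: l).map g).sum) % pvM := by
            rw [Int.emod_add_emod]; simp [add_assoc]

theorem pv_sumCongr (f g : Int → Int) (h : ∀ x, Int.ModEq pvM (f x) (g x)) :
    ∀ l : List Int, Int.ModEq pvM ((l.map f).sum) ((l.map g).sum) := by
  intro l
  induction l with
  | nil => rfl
  | cons a l ih => simpa using (h a).add ih

theorem pv_sum_map_mul (c : Int) (l : List Int) : (l.map (fun x => c * x)).sum = c * l.sum := by
  induction l with
  | nil => simp
  | cons a l ih => simp [ih, mul_add]

-- sum of range(1, n+1) is the triangular number, doubled to avoid division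
theorem pv_twoSum : ∀ n : Int, 2 * (PySem.List.pyRange 1 (n + 1) 1).sum = max n 0 * (max n 0 + 1) := by
  have hnat : ∀ m : Nat, 2 * (PySem.List.pyRange 1 ((m : Int) + 1) 1).sum = (m : Int) * ((m : Int) + 1) := by
    intro m
    induction m with
    | zero => simp [PySem.List.pyRange_one_eq_nil (le_refl (1 : Int))]
    | succ m ih =>
      have h1 : (1 : Int) ≤ (m : Int) + 1 := by omega
      have : ((m + 1 : Nat) : Int) + 1 = ((m : Int) + 1) + 1 := by push_cast; ring
      rw [this, PySem.List.pyRange_one_succ_right h1]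
      simp only [List.sum_append, List.sum_cons, List.sum_nil]
      push_cast
      linear_combination ih
  intro n
  by_cases h : n ≤ 0
  · rw [PySem.List.pyRange_one_eq_nil (by omega : n + 1 ≤ 1)]
    simp [max_eq_right h]
  · have h' : (0 : Int) ≤ n := by omega
    obtain ⟨m, rfl⟩ : ∃ m : Nat, n = (m : Int) := ⟨n.toNat, (Int.toNat_of_nonneg h').symm⟩
    rw [max_eq_left (by positivity)]
    exact hnat m

theorem pv_sumRange (n : Int) : (PySem.List.pyRange 1 (n + 1) 1).sum = pvTri n := by
  have h2 := pv_twoSum n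
  have : pvTri n = (max n 0 * (max n 0 + 1)) / 2 := by
    unfold pvTri; exact PySem.Int.floordiv_eq_ediv_of_pos (by norm_num)
  rw [this, ← h2, Int.mul_ediv_cancel_left _ (by norm_num)]

-- the products A sums are congruent to i*j*k mod pvM
theorem pv_prodCong (i j k : Int) :
    Int.ModEq pvM (((i % pvM * (j % pvM)) % pvM * (k % pvM)) % pvM) (i * j * k) := by
  unfold Int.ModEq
  conv_rhs => rw [Int.mul_emod (i * j) k, Int.mul_emod i j]
  simp [Int.emod_emod_of_dvd]

theorem pv_main (A B C : Int) : findTripleSum A B C = findTripleSum_alt A B C := by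
  set RA := PySem.List.pyRange 1 (A + 1) 1 with hRA
  set RB := PySem.List.pyRange 1 (B + 1) 1 with hRB
  set RC := PySem.List.pyRange 1 (C + 1) 1 with hRC
  set g3 : Int → Int → Int → Int := fun i j k => ((i % pvM * (j % pvM)) % pvM * (k % pvM)) % pvM with hg3
  set g2 : Int → Int → Int := fun i j => (RC.map (g3 i j)).sum with hg2
  set g1 : Int → Int := fun i => (RB.map (g2 i)).sum with hg1
  -- evaluate A's triple loop
  have h3 : ∀ i j s, s % pvM = s →
      RC.foldl (fun sum k => (sum + g3 i j k) % pvM) s = (s + g2 i j) % pvM :=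
    fun i j s hs => pv_foldG RC _ (g3 i j) (fun _ _ _ => rfl) s hs
  have h2 : ∀ i s, s % pvM = s →
      RB.foldl (fun sum j => RC.foldl (fun sum k => (sum + g3 i j k) % pvM) sum) s = (s + g1 i) % pvM :=
    fun i s hs => pv_foldG RB _ (g2 i) (fun acc j h => h3 i j acc h) s hs
  have hA : findTripleSum A B C = (0 + (RA.map g1).sum) % pvM := by
    unfold findTripleSum
    simp only [pv_modM, ← hRA, ← hRB, ← hRC]
    exact pv_foldG RA _ g1 (fun acc i h => h2 i acc h) 0 (by norm_num [pvM])
  -- congruence of the big sum to the product of sums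
  have hc2 : ∀ i j, Int.ModEq pvM (g2 i j) (i * j * RC.sum) := by
    intro i j
    have := pv_sumCongr (g3 i j) (fun k => i * j * k) (fun k => pv_prodCong i j k) RC
    have hmul : (RC.map (fun k => i * j * k)).sum = i * j * RC.sum := pv_sum_map_mul (i * j) RC
    simpa [hg2, hmul] using this
  have hc1 : ∀ i, Int.ModEq pvM (g1 i) (i * RB.sum * RC.sum) := by
    intro i
    have := pv_sumCongr (g2 i) (fun j => i * j * RC.sum) (hc2 i) RB
    have he : (fun j => i * j * RC.sum) = fun j => (i * RC.sum) * j := funext fun j => by ring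
    have hmul : (RB.map (fun j => i * j * RC.sum)).sum = (i * RC.sum) * RB.sum := by
      rw [he]; exact pv_sum_map_mul _ RB
    have : Int.ModEq pvM (g1 i) ((i * RC.sum) * RB.sum) := by simpa [hg1, hmul] using this
    simpa [mul_comm, mul_assoc, mul_left_comm] using this
  have hbig : Int.ModEq pvM ((RA.map g1).sum) (RA.sum * RB.sum * RC.sum) := by
    have := pv_sumCongr g1 (fun i => i * RB.sum * RC.sum) hc1 RA
    have he : (fun i : Int => i * RB.sum * RC.sum) = fun i => (RB.sum * RC.sum) * i := funext fun i => by ring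
    have hmul : (RA.map (fun i => i * RB.sum * RC.sum)).sum = (RB.sum * RC.sum) * RA.sum := by
      rw [he]; exact pv_sum_map_mul _ RA
    have h := hmul ▸ this
    simpa [mul_comm, mul_assoc, mul_left_comm] using h
  -- close: both sides equal (T(A)*T(B)*T(C)) % pvM
  have halt : findTripleSum_alt A B C = (pvTri A * pvTri B * pvTri C) % pvM := by
    unfold findTripleSum_alt
    simp only [pv_modM]
    conv_rhs => rw [Int.mul_emod (pvTri A * pvTri B) (pvTri C), Int.mul_emod (pvTri A) (pvTri B)]
  rw [hA, zero_add, hbig, halt, hRA, hRB, hRC, pv_sumRange, pv_sumRange, pv_sumRange]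

-- ===== VERDICT (by name: the statement is the Claim_ definition above) =====
theorem findTripleSum_spec : Claim_equal_findTripleSum := by
  intro A B C _
  unfold Spec_findTripleSum
  exact pv_main A B C
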